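-- pv_equiv track=rewrite | github.com/Ninteedo/AdventOfCode2021 | 10.py | lineScore
-- ===== SOURCE A (Python) =====
-- def lineScore(line: str) -> int:
--     '''O(n)'''
--     scores = { ")": 1, "]": 2, "}": 3, ">": 4 }
--     pairs = { "(": ")", "[": "]", "{": "}", "<": ">" }
--     opened = []
--     for c in line:
--         if c in pairs:  opened.append(c)
--         else:           opened.pop()
--     return sum([ scores[pairs[c]] * (5 ** i) for i, c in enumerate(opened) ])
-- ===== SOURCE B (Python) =====
-- def lineScore(line: str) -> int:
--     # One streaming pass: maintain the autocomplete polynomial value directly.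
--     # An opener of score v enters with weight 5**len(stack); a closing character
--     # removes the most recent opener's contribution. No second pass, no 5**i.
--     scores = { "(": 1, "[": 2, "{": 3, "<": 4 }
--     total = 0
--     stack = []          # scores of the currently open brackets
--     pw = 1              # 5 ** len(stack)
--     for c in line:
--         if c in scores:
--             v = scores[c]
--             total += v * pw
--             stack.append(v)
--             pw *= 5
--         else:
--             pw //= 5
--             total -= stack.pop() * pw
--     return total
-- ===== Notes on version B (the rewrite author's own statement) =====
-- stated objective: alternative
-- what changed: Replaces A's character stack plus final enumerate/5**i summation by one streaming pass that maintains the autocomplete polynomial directly: a running total, a stack of the open brackets' scores, and the current weight 5^depth, so the closer dict, the second pass and the explicit exponentiation all disappear.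
import Mathlib
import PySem

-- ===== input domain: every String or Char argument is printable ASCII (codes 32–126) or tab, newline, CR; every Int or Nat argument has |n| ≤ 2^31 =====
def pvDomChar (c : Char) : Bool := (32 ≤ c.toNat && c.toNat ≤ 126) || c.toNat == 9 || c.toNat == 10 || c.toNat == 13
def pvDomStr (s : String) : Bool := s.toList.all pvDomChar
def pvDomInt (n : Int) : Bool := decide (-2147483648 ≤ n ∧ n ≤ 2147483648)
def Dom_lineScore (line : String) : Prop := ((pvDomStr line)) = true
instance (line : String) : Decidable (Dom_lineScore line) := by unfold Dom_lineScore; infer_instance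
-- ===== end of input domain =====

-- B replaces A's char-stack + final enumerate/5**i summation by one streaming pass
-- that maintains the polynomial value (a running total, a stack of scores and the
-- current weight 5^depth); same O(n) cost, alternative shape; equivalence is claimed
-- on Pre_ (no stack underflow, where A returns instead of raising IndexError).

-- ===== PORT A =====
def pvScoresA : PySem.Dict Char Int :=
  PySem.Dict.ofList [(')', 1), (']', 2), ('}', 3), ('>', 4)]
def pvPairsA : PySem.Dict Char Char :=
  PySem.Dict.ofList [('(', ')'), ('[', ']'), ('{', '}'), ('<', '>')]

-- the 'for c in line' loop; none = the IndexError of opened.pop() on an empty list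
def lineScoreLoop : List Char → List Char → Option (List Char)
  | [], opened => some opened
  | c :: rest, opened =>
    if pvPairsA.contains c then lineScoreLoop rest (opened ++ [c])
    else
      match PySem.List.pop? opened (-1) with
      | some (_, opened') => lineScoreLoop rest opened'
      | none => none

def lineScore (line : String) : Int :=
  match lineScoreLoop line.toList [] with
  | some opened =>
      -- enumerate indices start at 0, so p.1.toNat is exact for Python's 5 ** i here
      ((PySem.List.enumerate opened 0).map
        (fun p => pvScoresA.getD (pvPairsA.getD p.2 ' ') 0 * (5 : Int) ^ p.1.toNat)).sum
  | none => 0   -- unreachable under Pre_lineScore (A raises IndexError here)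

-- ===== PORT B =====
def pvScoresB : PySem.Dict Char Int :=
  PySem.Dict.ofList [('(', 1), ('[', 2), ('{', 3), ('<', 4)]

-- B's 'for c in line' loop over (total, stack, pw); none = IndexError of stack.pop()
def lineScoreAltLoop : List Char → Int × List Int × Int → Option (Int × List Int × Int)
  | [], st => some st
  | c :: rest, (total, stack, pw) =>
    if pvScoresB.contains c then
      let v := pvScoresB.getD c 0
      lineScoreAltLoop rest (total + v * pw, stack ++ [v], pw * 5)
    else
      let pw' := PySem.Int.floordiv pw 5
      match PySem.List.pop? stack (-1) with
      | some (x, stack') => lineScoreAltLoop rest (total - x * pw', stack', pw')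
      | none => none

def lineScore_alt (line : String) : Int :=
  match lineScoreAltLoop line.toList (0, [], 1) with
  | some st => st.1
  | none => 0   -- unreachable under Pre_lineScore (B raises IndexError here, like A)

-- ===== PRECONDITION & SPEC =====
def pvIsOpener (c : Char) : Bool := c = '(' || c = '[' || c = '{' || c = '<'

-- Pre_ excludes exactly the lines where opened.pop() underflows, i.e. A raises
-- IndexError: every prefix must have at least as many openers as other characters.
def Pre_lineScore (line : String) : Prop :=
  ∀ n < line.toList.length + 1,
    (line.toList.take n).countP (fun c => !(pvIsOpener c)) ≤
      (line.toList.take n).countP (fun c => pvIsOpener c)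
instance (line : String) : Decidable (Pre_lineScore line) := by
  unfold Pre_lineScore; infer_instance
def pvWitness_lineScore : String := ("((((((((((")

def Spec_lineScore (line : String) (out : Int) : Prop := out = lineScore_alt line
instance (line : String) (out : Int) : Decidable (Spec_lineScore line out) := by
  unfold Spec_lineScore; infer_instance

-- ===== CLAIM (what is proved, stated in full; the proofs are below) =====
def Claim_equal_lineScore : Prop :=
  ∀ (line : String), Dom_lineScore line → Pre_lineScore line → Spec_lineScore line (lineScore line)

-- ===== LEMMAS AND PROOFS =====

-- B's score of an opener (0 on anything else)
def pvScore (c : Char) : Int := pvScoresB.getD c 0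
-- Horner value of a stack (bottom-to-top list): the top gets the highest power of 5
def pvW (l : List Char) : Int := l.reverse.foldl (fun a c => a * 5 + pvScore c) 0

theorem pvContains_pairs (c : Char) : pvPairsA.contains c = pvIsOpener c := by
  show (PySem.Dict.mk [('(', ')'), ('[', ']'), ('{', '}'), ('<', '>')]).contains c = _
  simp [PySem.Dict.contains_mk, pvIsOpener, beq_eq_decide, eq_comm, Bool.or_assoc]

theorem pvContains_scoresB (c : Char) : pvScoresB.contains c = pvIsOpener c := by
  show (PySem.Dict.mk [('(', 1), ('[', 2), ('{', 3), ('<', 4)]).contains c = _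
  simp [PySem.Dict.contains_mk, pvIsOpener, beq_eq_decide, eq_comm, Bool.or_assoc]

-- A's scores[pairs[c]] agrees with B's scores[c] on every Char (both give 0 off-openers)
theorem pvScore_eq (c : Char) :
    pvScoresA.getD (pvPairsA.getD c ' ') 0 = pvScore c := by
  by_cases h1 : c = '(' ; · subst h1; decide
  by_cases h2 : c = '[' ; · subst h2; decide
  by_cases h3 : c = '{' ; · subst h3; decide
  by_cases h4 : c = '<' ; · subst h4; decide
  have hop : pvIsOpener c = false := by simp [pvIsOpener, h1, h2, h3, h4]
  have hpp : pvPairsA.getD c ' ' = ' ' := by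
    apply PySem.Dict.getD_of_not_contains; rw [pvContains_pairs]; exact hop
  have hs : pvScore c = 0 := by
    apply PySem.Dict.getD_of_not_contains; rw [pvContains_scoresB]; exact hop
  rw [hpp, hs]; decide

theorem pvW_cons (c : Char) (l : List Char) : pvW (c :: l) = pvW l * 5 + pvScore c := by
  simp [pvW, List.foldl_append]

-- the contribution of a newly pushed opener: pvW grows by its score times 5^depth
theorem pvW_append (l : List Char) (c : Char) :
    pvW (l ++ [c]) = pvW l + pvScore c * 5 ^ l.length := by
  induction l with
  | nil => simp [pvW]
  | cons c' l ih =>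
    rw [List.cons_append, pvW_cons, pvW_cons, ih]
    simp [pow_succ]
    ring

theorem pvFloordiv_pow (n : ℕ) : PySem.Int.floordiv ((5 : Int) ^ (n + 1)) 5 = 5 ^ n := by
  rw [PySem.Int.floordiv_eq_ediv_of_pos (by norm_num), pow_succ]
  exact Int.mul_ediv_cancel _ (by norm_num)

-- main invariant: while A's loop carries the stack of opener characters, B's loop
-- carries the same information as (polynomial value, stack of scores, 5^depth)
theorem pvMain : ∀ (l opened t : List Char), lineScoreLoop l opened = some t →
    lineScoreAltLoop l (pvW opened, opened.map pvScore, 5 ^ opened.length)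
      = some (pvW t, t.map pvScore, 5 ^ t.length) := by
  intro l
  induction l with
  | nil =>
    intro opened t h
    simp [lineScoreLoop] at h
    simp [lineScoreAltLoop, h]
  | cons c l ih =>
    intro opened t h
    by_cases hc : pvPairsA.contains c = true
    · rw [lineScoreLoop, if_pos hc] at h
      have hcb : pvScoresB.contains c = true := by
        rw [pvContains_scoresB, ← pvContains_pairs]; exact hc
      rw [lineScoreAltLoop, if_pos hcb]
      have := ih (opened ++ [c]) t h
      simpa [pvW_append, pvScore, List.length_append, pow_succ] using this
    · rw [lineScoreLoop, if_neg hc] at h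
      have hcb : pvScoresB.contains c = false := by
        rw [pvContains_scoresB, ← pvContains_pairs]; simpa using hc
      rcases List.eq_nil_or_concat opened with rfl | ⟨s₀, x, rfl⟩
      · simp [PySem.List.pop?] at h
      · simp only [List.concat_eq_append] at h ⊢
        rw [PySem.List.pop?_last] at h
        rw [lineScoreAltLoop, if_neg (by simp [hcb])]
        rw [List.map_append, List.map_singleton, PySem.List.pop?_last]
        have hpw : PySem.Int.floordiv ((5 : Int) ^ (s₀ ++ [x]).length) 5 = 5 ^ s₀.length := by
          simpa using pvFloordiv_pow s₀.length
        have htot : pvW (s₀ ++ [x]) - pvScore x * 5 ^ s₀.length = pvW s₀ := by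
          rw [pvW_append]; ring
        simp only [hpw, htot]
        exact ih s₀ t h

-- totality: if every prefix has at least as many openers as other characters (shifted
-- by the length of the starting stack), A's loop never underflows.
theorem pvTotal : ∀ (l s : List Char),
    (∀ n, n ≤ l.length → (l.take n).countP (fun c => !(pvIsOpener c)) ≤
      (l.take n).countP (fun c => pvIsOpener c) + s.length) →
    (lineScoreLoop l s).isSome := by
  intro l
  induction l with
  | nil => intro s _; simp [lineScoreLoop]
  | cons c l ih =>
    intro s hcount
    by_cases hc : pvPairsA.contains c = true
    · have hop : pvIsOpener c = true := by rw [← pvContains_pairs]; exact hc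
      rw [lineScoreLoop, if_pos hc]
      apply ih
      intro n hn
      have h := hcount (n + 1) (by simpa using hn)
      simp [List.take_succ_cons, hop] at h ⊢
      omega
    · have hop : pvIsOpener c = false := by rw [← pvContains_pairs]; simpa using hc
      have h1 := hcount 1 (by simp)
      simp only [List.take_succ_cons, List.take_zero, List.countP_cons, List.countP_nil,
        hop, Bool.not_false] at h1
      rcases List.eq_nil_or_concat s with rfl | ⟨s₀, x, rfl⟩
      · simp at h1
      · rw [lineScoreLoop, if_neg hc]
        simp only [List.concat_eq_append]
        rw [PySem.List.pop?_last]
        apply ih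
        intro n hn
        have h := hcount (n + 1) (by simpa using hn)
        simp [List.take_succ_cons, hop] at h ⊢
        omega

-- A's enumerate/5^i sum is the Horner value of the reversed stack
theorem pvSumEnum : ∀ (l : List Char) (s : ℕ),
    ((PySem.List.enumerate l (s : Int)).map
      (fun p => pvScoresA.getD (pvPairsA.getD p.2 ' ') 0 * (5 : Int) ^ p.1.toNat)).sum
      = 5 ^ s * pvW l := by
  intro l
  induction l with
  | nil => intro s; simp [PySem.List.enumerate_nil, pvW]
  | cons c l ih =>
    intro s
    rw [PySem.List.enumerate_cons]
    have hcast : (s : Int) + 1 = ((s + 1 : ℕ) : Int) := by push_cast; ring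
    rw [List.map_cons, List.sum_cons, hcast, ih (s + 1), pvW_cons, pvScore_eq]
    simp only [Int.toNat_natCast]
    ring

-- ===== VERDICT (by name: the statement is the Claim_ definition above) =====
theorem lineScore_spec : Claim_equal_lineScore := by
  intro line _ hpre
  unfold Spec_lineScore
  have htot := pvTotal line.toList []
    (by intro n hn; simpa using hpre n (by omega))
  obtain ⟨t, ht⟩ := Option.isSome_iff_exists.mp htot
  have hB := pvMain _ _ _ ht
  simp only [List.map_nil, List.length_nil, pow_zero] at hB
  have hW0 : pvW [] = 0 := rfl
  rw [hW0] at hB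
  unfold lineScore lineScore_alt
  rw [ht, hB]
  simpa using pvSumEnum t 0
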